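-- pv_equiv track=rewrite | github.com/josiegel/AOC-2025 | Day 6/day 6 part 1.py | run_ops
-- ===== SOURCE A (Python) =====
-- import math
--
-- def run_ops(matrix):
--     total = 0
--     for i in range(len(matrix[0])):
--         terms = []
--         for n in range(len(matrix)-1):
--             terms.append(int(matrix[n][i]))
--         if matrix[-1][i] == '+':
--             total += sum(terms)
--         if matrix[-1][i] == '*':
--             total += math.prod(terms)
--     return total
-- ===== SOURCE B (Python) =====
-- def run_ops(matrix):
--     ops = matrix[-1]
--     w = len(matrix[0])
--     acc = [0 if op == '+' else 1 if op == '*' else None for op in ops[:w]]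
--     for row in matrix[:-1]:
--         for i in range(w):
--             v = int(row[i])
--             if acc[i] is not None:
--                 if ops[i] == '+':
--                     acc[i] += v
--                 else:
--                     acc[i] *= v
--     return sum(a for a in acc if a is not None)
-- ===== Notes on version B (the rewrite author's own statement) =====
-- stated objective: alternative
-- what changed: B replaces A's per-column collection of a terms list folded with sum/math.prod by a single row-major pass that maintains one running accumulator per column (0-init for '+', 1-init for '*', None for unknown operators) and finally sums the live accumulators.
import Mathlib
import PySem

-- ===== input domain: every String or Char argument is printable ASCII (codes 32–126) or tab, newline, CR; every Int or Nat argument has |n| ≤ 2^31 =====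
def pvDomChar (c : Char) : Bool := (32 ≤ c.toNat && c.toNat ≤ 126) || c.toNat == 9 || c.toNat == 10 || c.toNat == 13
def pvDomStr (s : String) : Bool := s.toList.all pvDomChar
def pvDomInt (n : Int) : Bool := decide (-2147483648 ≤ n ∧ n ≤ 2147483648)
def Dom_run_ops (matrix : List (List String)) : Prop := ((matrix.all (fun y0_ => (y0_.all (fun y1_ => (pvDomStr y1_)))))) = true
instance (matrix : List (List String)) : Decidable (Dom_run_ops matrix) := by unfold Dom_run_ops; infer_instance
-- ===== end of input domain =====

-- B replaces A's per-column terms list (folded with sum/math.prod) by a single row-major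
-- pass maintaining one running accumulator per column; same complexity (objective: alternative).

-- ===== PORT A =====
def run_ops (matrix : List (List String)) : Int :=
  (List.range (matrix.getD 0 []).length).foldl
    (fun total i =>
      let terms : List Int :=
        (List.range (matrix.length - 1)).foldl
          (fun ts n => ts ++ [(PySem.Int.ofStr? ((matrix.getD n []).getD i "")).getD 0]) []
      let lastRow := PySem.List.pyGetD matrix (-1) ([] : List String)
      let total := if lastRow.getD i "" = "+" then total + terms.sum else total
      if lastRow.getD i "" = "*" then total + terms.prod else total)
    0

-- ===== PORT B =====
def run_ops_alt (matrix : List (List String)) : Int :=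
  let ops := PySem.List.pyGetD matrix (-1) ([] : List String)
  let w := (matrix.getD 0 []).length
  let acc0 : List (Option Int) :=
    (ops.take w).map (fun op => if op = "+" then some (0 : Int) else if op = "*" then some 1 else none)
  let accF := matrix.dropLast.foldl
    (fun acc row =>
      (List.range w).foldl
        (fun acc i =>
          let v := (PySem.Int.ofStr? (row.getD i "")).getD 0
          if (acc.getD i none).isSome then
            acc.set i (some (if ops.getD i "" = "+" then (acc.getD i none).getD 0 + v
                             else (acc.getD i none).getD 0 * v))
          else acc)
        acc)
    acc0
  (accF.filterMap id).sum

-- ===== PRECONDITION & SPEC =====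
-- Pre_ = exactly the inputs where Python A returns normally: matrix nonempty, the operator
-- (last) row and every data row reach width len(matrix[0]), and every used data cell parses as int.
def Pre_run_ops (matrix : List (List String)) : Prop :=
  matrix ≠ [] ∧
  (matrix.getD 0 []).length ≤ (matrix.getLast?.getD []).length ∧
  ∀ r ∈ matrix.dropLast,
    (matrix.getD 0 []).length ≤ r.length ∧
    ∀ s ∈ r.take (matrix.getD 0 []).length, (PySem.Int.ofStr? s).isSome = true
instance (matrix : List (List String)) : Decidable (Pre_run_ops matrix) := by
  unfold Pre_run_ops; infer_instance

def pvWitness_run_ops : List (List String) := [["1", "2"], ["3", "4"], ["+", "*"]]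

def Spec_run_ops (matrix : List (List String)) (out : Int) : Prop := out = run_ops_alt matrix
instance (matrix : List (List String)) (out : Int) : Decidable (Spec_run_ops matrix out) := by unfold Spec_run_ops; infer_instance

-- ===== CLAIM (what is proved, stated in full; the proofs are below) =====
def Claim_equal_run_ops : Prop := ∀ (matrix : List (List String)), Dom_run_ops matrix → Pre_run_ops matrix → Spec_run_ops matrix (run_ops matrix)

-- ===== LEMMAS AND PROOFS =====

-- per-cell value, per-column step/init as B maintains them, and A's per-column contribution
def pvVal (row : List String) (i : Nat) : Int := (PySem.Int.ofStr? (row.getD i "")).getD 0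

def pvStep (op : String) (o : Option Int) (v : Int) : Option Int :=
  match o with
  | none => none
  | some a => some (if op = "+" then a + v else a * v)

def pvInit (op : String) : Option Int :=
  if op = "+" then some (0 : Int) else if op = "*" then some 1 else none

def pvColA (matrix : List (List String)) (i : Nat) : Int :=
  (if (PySem.List.pyGetD matrix (-1) ([] : List String)).getD i "" = "+" then
    (matrix.dropLast.map (fun r => pvVal r i)).sum else 0) +
  (if (PySem.List.pyGetD matrix (-1) ([] : List String)).getD i "" = "*" then
    (matrix.dropLast.map (fun r => pvVal r i)).prod else 0)

theorem pv_ext_getD (l1 l2 : List (Option Int)) (hlen : l1.length = l2.length)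
    (h : ∀ j, l1.getD j none = l2.getD j none) : l1 = l2 := by
  apply List.ext_getElem hlen
  intro i h1 h2
  have hh := h i
  rwa [List.getD_eq_getElem l1 none h1, List.getD_eq_getElem l2 none h2] at hh

theorem pv_map_range_getD (g : Nat → Option Int) (w j : Nat) :
    ((List.range w).map g).getD j none = if j < w then g j else none := by
  rcases Nat.lt_or_ge j w with hj | hj
  · rw [if_pos hj, List.getD_eq_getElem?_getD, List.getElem?_eq_getElem (by simpa using hj)]
    simp
  · rw [if_neg (by omega), List.getD_eq_getElem?_getD, List.getElem?_eq_none (by simpa using hj)]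
    rfl

theorem pv_take_eq_map_range {α : Type} (l : List α) (w : Nat) (d : α) (h : w ≤ l.length) :
    l.take w = (List.range w).map (fun i => l.getD i d) := by
  apply List.ext_getElem
  · simp; omega
  · intro i h1 h2
    have hi : i < l.length := by simp at h1; omega
    simp [List.getElem_take, List.getD_eq_getElem?_getD, List.getElem?_eq_getElem hi]

theorem pv_fold_len (u : List (Option Int) → Nat → List (Option Int))
    (h1 : ∀ acc i, (u acc i).length = acc.length)
    (l : List Nat) : ∀ acc : List (Option Int), (l.foldl u acc).length = acc.length := by
  induction l with
  | nil => intro acc; rfl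
  | cons x xs ih => intro acc; rw [List.foldl_cons, ih, h1]

theorem pv_fold_range_getD (u : List (Option Int) → Nat → List (Option Int))
    (step : Nat → Option Int → Option Int)
    (h2 : ∀ acc i j, j ≠ i → (u acc i).getD j none = acc.getD j none)
    (h3 : ∀ acc i, (u acc i).getD i none = step i (acc.getD i none))
    (w : Nat) : ∀ (acc : List (Option Int)) (j : Nat),
      ((List.range w).foldl u acc).getD j none
        = if j < w then step j (acc.getD j none) else acc.getD j none := by
  induction w with
  | zero => intro acc j; simp
  | succ w ih =>
    intro acc j
    rw [List.range_succ, List.foldl_append, List.foldl_cons, List.foldl_nil]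
    by_cases hj : j = w
    · subst hj
      rw [h3, ih]
      simp
    · rw [h2 _ _ _ hj, ih]
      by_cases hlt : j < w
      · simp [hlt, Nat.lt_succ_of_lt hlt]
      · have hlt2 : ¬ j < w + 1 := by omega
        simp [hlt, hlt2]

theorem pv_fold_range_map (u : List (Option Int) → Nat → List (Option Int))
    (step : Nat → Option Int → Option Int)
    (h1 : ∀ acc i, (u acc i).length = acc.length)
    (h2 : ∀ acc i j, j ≠ i → (u acc i).getD j none = acc.getD j none)
    (h3 : ∀ acc i, (u acc i).getD i none = step i (acc.getD i none))
    (w : Nat) (g : Nat → Option Int) :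
    (List.range w).foldl u ((List.range w).map g) = (List.range w).map (fun i => step i (g i)) := by
  apply pv_ext_getD
  · rw [pv_fold_len u h1]; simp
  · intro j
    rw [pv_fold_range_getD u step h2 h3]
    simp only [pv_map_range_getD]
    by_cases hj : j < w <;> simp [hj]

theorem pv_fold_outer {ρ : Type} (w : Nat)
    (u : ρ → List (Option Int) → Nat → List (Option Int))
    (step : ρ → Nat → Option Int → Option Int)
    (h1 : ∀ r acc i, (u r acc i).length = acc.length)
    (h2 : ∀ r acc i j, j ≠ i → (u r acc i).getD j none = acc.getD j none)
    (h3 : ∀ r acc i, (u r acc i).getD i none = step r i (acc.getD i none))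
    (rows : List ρ) : ∀ g : Nat → Option Int,
    rows.foldl (fun acc row => (List.range w).foldl (u row) acc) ((List.range w).map g)
      = (List.range w).map (fun i => rows.foldl (fun o row => step row i o) (g i)) := by
  induction rows with
  | nil => intro g; simp
  | cons r rest ih =>
    intro g
    rw [List.foldl_cons, pv_fold_range_map (u r) (step r) (h1 r) (h2 r) (h3 r) w g, ih]
    rfl

theorem pv_col_plus (i : Nat) (data : List (List String)) : ∀ s : Int,
    data.foldl (fun o row => pvStep "+" o (pvVal row i)) (some s)
      = some (s + (data.map (fun r => pvVal r i)).sum) := by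
  induction data with
  | nil => intro s; simp
  | cons r rest ih =>
    intro s
    simp only [List.foldl_cons, List.map_cons, List.sum_cons]
    rw [show pvStep "+" (some s) (pvVal r i) = some (s + pvVal r i) from by simp [pvStep],
      ih, add_assoc]

theorem pv_col_mul (i : Nat) (data : List (List String)) : ∀ s : Int,
    data.foldl (fun o row => pvStep "*" o (pvVal row i)) (some s)
      = some (s * (data.map (fun r => pvVal r i)).prod) := by
  induction data with
  | nil => intro s; simp
  | cons r rest ih =>
    intro s
    simp only [List.foldl_cons, List.map_cons, List.prod_cons]
    rw [show pvStep "*" (some s) (pvVal r i) = some (s * pvVal r i) from by simp [pvStep],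
      ih, mul_assoc]

theorem pv_col_none (op : String) (i : Nat) (data : List (List String)) :
    data.foldl (fun o row => pvStep op o (pvVal row i)) none = none := by
  induction data with
  | nil => rfl
  | cons r rest ih => simpa [pvStep] using ih

theorem pv_sum_filterMap (l : List (Option Int)) :
    (l.filterMap id).sum = (l.map (fun o => o.getD 0)).sum := by
  induction l with
  | nil => rfl
  | cons o rest ih => cases o <;> simpa using ih

theorem pv_foldl_add_of (f : Int → Nat → Int) (c : Nat → Int)
    (hf : ∀ t i, f t i = t + c i) (l : List Nat) : ∀ t : Int,
    l.foldl f t = t + (l.map c).sum := by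
  induction l with
  | nil => intro t; simp
  | cons x xs ih => intro t; rw [List.foldl_cons, hf, ih]; simp [add_assoc]

theorem pvA_eq (matrix : List (List String)) :
    run_ops matrix = ((List.range (matrix.getD 0 []).length).map (pvColA matrix)).sum := by
  have hf : ∀ (t : Int) (i : Nat),
      (fun (total : Int) (i : Nat) =>
        let terms : List Int :=
          (List.range (matrix.length - 1)).foldl
            (fun ts n => ts ++ [(PySem.Int.ofStr? ((matrix.getD n []).getD i "")).getD 0]) []
        let lastRow := PySem.List.pyGetD matrix (-1) ([] : List String)
        let total := if lastRow.getD i "" = "+" then total + terms.sum else total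
        if lastRow.getD i "" = "*" then total + terms.prod else total) t i
      = t + pvColA matrix i := by
    intro t i
    have hterms : (List.range (matrix.length - 1)).foldl
        (fun ts n => ts ++ [(PySem.Int.ofStr? ((matrix.getD n []).getD i "")).getD 0]) ([] : List Int)
        = matrix.dropLast.map (fun r => pvVal r i) := by
      rw [PySem.List.foldl_append_singleton_eq_map]
      have hd : (List.range (matrix.length - 1)).map (fun n => matrix.getD n []) = matrix.dropLast := by
        rw [List.dropLast_eq_take, pv_take_eq_map_range matrix (matrix.length - 1) [] (by omega)]
      calc (List.range (matrix.length - 1)).map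
              (fun n => (PySem.Int.ofStr? ((matrix.getD n []).getD i "")).getD 0)
          = ((List.range (matrix.length - 1)).map (fun n => matrix.getD n [])).map (fun r => pvVal r i) := by
            rw [List.map_map]; rfl
        _ = matrix.dropLast.map (fun r => pvVal r i) := by rw [hd]
    show (if (PySem.List.pyGetD matrix (-1) ([] : List String)).getD i "" = "*" then
            (if (PySem.List.pyGetD matrix (-1) ([] : List String)).getD i "" = "+" then
              t + ((List.range (matrix.length - 1)).foldl
                (fun ts n => ts ++ [(PySem.Int.ofStr? ((matrix.getD n []).getD i "")).getD 0]) []).sum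
            else t)
            + ((List.range (matrix.length - 1)).foldl
                (fun ts n => ts ++ [(PySem.Int.ofStr? ((matrix.getD n []).getD i "")).getD 0]) []).prod
          else
            (if (PySem.List.pyGetD matrix (-1) ([] : List String)).getD i "" = "+" then
              t + ((List.range (matrix.length - 1)).foldl
                (fun ts n => ts ++ [(PySem.Int.ofStr? ((matrix.getD n []).getD i "")).getD 0]) []).sum
            else t))
        = t + pvColA matrix i
    rw [hterms]
    simp only [pvColA]
    split_ifs <;> ring
  exact (pv_foldl_add_of _ (pvColA matrix) hf _ 0).trans (by rw [zero_add])

theorem pvB_eq (matrix : List (List String))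
    (h : (matrix.getD 0 []).length ≤ (PySem.List.pyGetD matrix (-1) ([] : List String)).length) :
    run_ops_alt matrix = ((List.range (matrix.getD 0 []).length).map (pvColA matrix)).sum := by
  have h1 : ∀ (r : List String) (acc : List (Option Int)) (i : Nat),
      ((fun (acc : List (Option Int)) (i : Nat) =>
        if (acc.getD i none).isSome then
          acc.set i (some (if (PySem.List.pyGetD matrix (-1) ([] : List String)).getD i "" = "+"
            then (acc.getD i none).getD 0 + (PySem.Int.ofStr? (r.getD i "")).getD 0
            else (acc.getD i none).getD 0 * (PySem.Int.ofStr? (r.getD i "")).getD 0))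
        else acc) acc i).length = acc.length := by
    intro r acc i
    cases ho : acc[i]?.getD none <;> simp [List.getD_eq_getElem?_getD, ho]
  have h2 : ∀ (r : List String) (acc : List (Option Int)) (i j : Nat), j ≠ i →
      ((fun (acc : List (Option Int)) (i : Nat) =>
        if (acc.getD i none).isSome then
          acc.set i (some (if (PySem.List.pyGetD matrix (-1) ([] : List String)).getD i "" = "+"
            then (acc.getD i none).getD 0 + (PySem.Int.ofStr? (r.getD i "")).getD 0
            else (acc.getD i none).getD 0 * (PySem.Int.ofStr? (r.getD i "")).getD 0))
        else acc) acc i).getD j none = acc.getD j none := by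
    intro r acc i j hj
    cases ho : acc[i]?.getD none with
    | none => simp [List.getD_eq_getElem?_getD, ho]
    | some a =>
      have hij : i ≠ j := Ne.symm hj
      simp [List.getD_eq_getElem?_getD, ho, List.getElem?_set, hij]
  have h3 : ∀ (r : List String) (acc : List (Option Int)) (i : Nat),
      ((fun (acc : List (Option Int)) (i : Nat) =>
        if (acc.getD i none).isSome then
          acc.set i (some (if (PySem.List.pyGetD matrix (-1) ([] : List String)).getD i "" = "+"
            then (acc.getD i none).getD 0 + (PySem.Int.ofStr? (r.getD i "")).getD 0
            else (acc.getD i none).getD 0 * (PySem.Int.ofStr? (r.getD i "")).getD 0))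
        else acc) acc i).getD i none
      = pvStep ((PySem.List.pyGetD matrix (-1) ([] : List String)).getD i "")
          (acc.getD i none) (pvVal r i) := by
    intro r acc i
    cases ho : acc[i]?.getD none with
    | none => simp [List.getD_eq_getElem?_getD, ho, pvStep]
    | some a =>
      have hi : i < acc.length := by
        by_contra hcon
        rw [List.getElem?_eq_none (by omega)] at ho
        simp at ho
      have ho' : acc[i] = some a := by
        rw [List.getElem?_eq_getElem hi] at ho
        simpa using ho
      simp [List.getD_eq_getElem?_getD, ho', List.getElem?_set, hi, pvStep, pvVal]
  have main := pv_fold_outer (ρ := List String) (matrix.getD 0 []).length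
      (fun r acc i =>
        if (acc.getD i none).isSome then
          acc.set i (some (if (PySem.List.pyGetD matrix (-1) ([] : List String)).getD i "" = "+"
            then (acc.getD i none).getD 0 + (PySem.Int.ofStr? (r.getD i "")).getD 0
            else (acc.getD i none).getD 0 * (PySem.Int.ofStr? (r.getD i "")).getD 0))
        else acc)
      (fun r i o => pvStep ((PySem.List.pyGetD matrix (-1) ([] : List String)).getD i "") o (pvVal r i))
      h1 h2 h3 matrix.dropLast
      (fun i => pvInit ((PySem.List.pyGetD matrix (-1) ([] : List String)).getD i ""))
  have hacc0 : ((PySem.List.pyGetD matrix (-1) ([] : List String)).take (matrix.getD 0 []).length).map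
        (fun op => if op = "+" then some (0 : Int) else if op = "*" then some 1 else none)
      = (List.range (matrix.getD 0 []).length).map
        (fun i => pvInit ((PySem.List.pyGetD matrix (-1) ([] : List String)).getD i "")) := by
    rw [pv_take_eq_map_range _ _ "" h, List.map_map]
    rfl
  show ((matrix.dropLast.foldl
      (fun acc row => (List.range (matrix.getD 0 []).length).foldl
        (fun acc i =>
          if (acc.getD i none).isSome then
            acc.set i (some (if (PySem.List.pyGetD matrix (-1) ([] : List String)).getD i "" = "+"
              then (acc.getD i none).getD 0 + (PySem.Int.ofStr? (row.getD i "")).getD 0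
              else (acc.getD i none).getD 0 * (PySem.Int.ofStr? (row.getD i "")).getD 0))
          else acc)
        acc)
      (((PySem.List.pyGetD matrix (-1) ([] : List String)).take (matrix.getD 0 []).length).map
        (fun op => if op = "+" then some (0 : Int) else if op = "*" then some 1 else none))).filterMap id).sum
    = ((List.range (matrix.getD 0 []).length).map (pvColA matrix)).sum
  rw [hacc0, main, pv_sum_filterMap, List.map_map]
  apply congrArg List.sum
  apply List.map_congr_left
  intro i _
  show (matrix.dropLast.foldl
      (fun o row => pvStep ((PySem.List.pyGetD matrix (-1) ([] : List String)).getD i "") o (pvVal row i))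
      (pvInit ((PySem.List.pyGetD matrix (-1) ([] : List String)).getD i ""))).getD 0
    = pvColA matrix i
  simp only [pvColA]
  by_cases hp : (PySem.List.pyGetD matrix (-1) ([] : List String)).getD i "" = "+"
  · rw [hp, show pvInit "+" = some (0 : Int) from by simp [pvInit], pv_col_plus,
      if_pos rfl, if_neg (by decide : ¬("+" : String) = "*")]
    simp
  · by_cases hm : (PySem.List.pyGetD matrix (-1) ([] : List String)).getD i "" = "*"
    · rw [hm, show pvInit "*" = some (1 : Int) from by simp [pvInit], pv_col_mul,
        if_neg (by decide : ¬("*" : String) = "+"), if_pos rfl]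
      simp
    · rw [show pvInit ((PySem.List.pyGetD matrix (-1) ([] : List String)).getD i "") = none from by
          simp only [pvInit]; rw [if_neg hp, if_neg hm],
        pv_col_none, if_neg hp, if_neg hm]
      simp

-- ===== VERDICT (by name: the statement is the Claim_ definition above) =====
theorem run_ops_spec : Claim_equal_run_ops := by
  intro matrix _ hpre
  obtain ⟨hne, hops, -⟩ := hpre
  have hlast : matrix.getLast? = some (matrix.getLast hne) :=
    List.getLast?_eq_some_getLast hne
  have hg : PySem.List.pyGetD matrix (-1) ([] : List String) = matrix.getLast hne :=
    PySem.List.pyGetD_neg_one matrix ([] : List String) hne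
  have hlen : (matrix.getD 0 []).length ≤ (PySem.List.pyGetD matrix (-1) ([] : List String)).length := by
    rw [hg]
    rw [hlast] at hops
    simpa using hops
  show run_ops matrix = run_ops_alt matrix
  rw [pvA_eq, pvB_eq matrix hlen]
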